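-- pv_equiv track=rewrite | github.com/AspenWeb/pando.py | tests/dispatch_table_test.py | find_cols
-- ===== SOURCE A (Python) =====
-- def find_cols(defline, header_char='='):
--     """
--     return a sorted list of (start, end) indexes into defline that
--     are the beginning and ending indexes of column definitions
--     based on a reStructuredText table header line.
--     Note that this is a braindead simple version that only understands
--     header_chars and spaces (no other whitespace)
--     """
--     i = 0;
--     colstarts = []
--     colends = []
--     while i < len(defline):
--         if len(colstarts) <= len(colends):
--             nextstart = defline.find(header_char, i)
--             if nextstart >= 0:
--                 colstarts.append(nextstart)
--                 i = nextstart
--             else: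
--                 break
--         else:
--             nextend = defline.find(' ',i)
--             if nextend >= 0:
--                 colends.append(nextend)
--                 i = nextend
--             else:
--                 colends.append(len(defline))
--                 break
--
--     return zip(colstarts,colends)
-- ===== SOURCE B (Python) =====
-- def find_cols(defline, header_char='='):
--     """
--     Same task as A, by a single left-to-right character scan instead of
--     alternating str.find jumps: walk the line once, opening a column at the
--     first position where header_char matches and closing it at the next
--     space (or end of line).
--     """
--     n = len(defline)
--     cols = []
--     start = None
--     j = 0
--     while j < n:
--         if start is None and defline.startswith(header_char, j):
--             start = j
--         if start is not None and defline[j] == ' ':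
--             cols.append((start, j))
--             start = None
--         j += 1
--     if start is not None:
--         cols.append((start, n))
--     return cols
-- ===== Notes on version B (the rewrite author's own statement) =====
-- stated objective: alternative
-- what changed: Replaces A's alternating str.find state machine (two index-jumping searches feeding separate colstarts/colends lists, zipped at the end) by a single left-to-right character scan that carries an open-column marker and emits complete (start, end) pairs as it goes.
import Mathlib
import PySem

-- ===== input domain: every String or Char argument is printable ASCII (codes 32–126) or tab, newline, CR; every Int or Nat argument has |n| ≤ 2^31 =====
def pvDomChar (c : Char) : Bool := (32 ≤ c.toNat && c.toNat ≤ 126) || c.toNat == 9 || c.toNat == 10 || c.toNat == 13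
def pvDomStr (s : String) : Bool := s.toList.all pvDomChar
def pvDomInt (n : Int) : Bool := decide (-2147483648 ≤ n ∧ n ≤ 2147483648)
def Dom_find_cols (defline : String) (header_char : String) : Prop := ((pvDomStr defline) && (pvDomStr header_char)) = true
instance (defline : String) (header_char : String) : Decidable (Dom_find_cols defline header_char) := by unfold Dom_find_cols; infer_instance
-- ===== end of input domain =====

-- B replaces A's alternating str.find state machine by one left-to-right character scan
-- (objective: alternative — a genuinely different traversal, similar cost).
-- Both Pythons return lazy iterators; the equivalence is about the yielded sequence of pairs.

-- ===== PORT A =====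
-- A's while-loop; fuel 2*len+2 suffices for every input Pre_ admits (each iteration appends
-- one element and within Pre_ the index strictly advances between appended pairs).
def findColsLoopA (defline header_char : String) :
    Nat → Int → List Int → List Int → List Int × List Int
  | 0, _, colstarts, colends => (colstarts, colends)
  | fuel+1, i, colstarts, colends =>
    if i < PySem.Str.len defline then
      if colstarts.length ≤ colends.length then
        let nextstart := PySem.Str.findFrom defline header_char i
        if nextstart ≥ 0 then
          findColsLoopA defline header_char fuel nextstart (colstarts ++ [nextstart]) colends
        else
          (colstarts, colends)
      else
        let nextend := PySem.Str.findFrom defline " " i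
        if nextend ≥ 0 then
          findColsLoopA defline header_char fuel nextend colstarts (colends ++ [nextend])
        else
          (colstarts, colends ++ [PySem.Str.len defline])
    else
      (colstarts, colends)

def find_cols (defline : String) (header_char : String) : List (Int × Int) :=
  let p := findColsLoopA defline header_char (2 * defline.toList.length + 2) 0 [] []
  p.1.zip p.2            -- zip(colstarts, colends)

-- ===== PORT B =====
-- B's while-loop over j; Python's defline.startswith(header_char, j) is ported as
-- startswith on d.drop j (exact for 0 ≤ j); the trailing append after the loop is the
-- exit case of the recursion.
def scanColsB (d h : List Char) (n : Nat) (j : Nat) (start? : Option Nat)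
    (cols : List (Int × Int)) : List (Int × Int) :=
  if _hj : j < n then
    let s1 : Option Nat :=
      if start? = none ∧ PySem.Chars.startswith (d.drop j) h then some j else start?
    match s1 with
    | some s =>
      if PySem.List.pyGet? d (j : Int) = some ' ' then
        scanColsB d h n (j+1) none (cols ++ [((s : Int), (j : Int))])
      else
        scanColsB d h n (j+1) (some s) cols
    | none => scanColsB d h n (j+1) none cols
  else
    match start? with
    | some s => cols ++ [((s : Int), (n : Int))]
    | none => cols
termination_by n - j

def find_cols_alt (defline : String) (header_char : String) : List (Int × Int) :=
  let d := defline.toList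
  scanColsB d header_char.toList d.length 0 none []

-- ===== PRECONDITION & SPEC =====
-- Pre_ excludes exactly the inputs on which A loops forever (never returning): an empty
-- header_char with a space somewhere in defline, or a header_char that starts with a space
-- and occurs in defline; on every other input A returns and B matches it.
def Pre_find_cols (defline : String) (header_char : String) : Prop :=
  ¬ ((header_char.toList = [] ∧ ' ' ∈ defline.toList) ∨
     (header_char.toList.head? = some ' ' ∧ header_char.toList <:+: defline.toList))
instance (defline : String) (header_char : String) : Decidable (Pre_find_cols defline header_char) := by unfold Pre_find_cols; infer_instance

def pvWitness_find_cols : String × String := ("==  === x", "=")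

def Spec_find_cols (defline : String) (header_char : String) (out : List (Int × Int)) : Prop := out = find_cols_alt defline header_char
instance (defline : String) (header_char : String) (out : List (Int × Int)) : Decidable (Spec_find_cols defline header_char out) := by unfold Spec_find_cols; infer_instance

-- ===== CLAIM (what is proved, stated in full; the proofs are below) =====
def Claim_equal_find_cols : Prop := ∀ (defline : String) (header_char : String), Dom_find_cols defline header_char → Pre_find_cols defline header_char → Spec_find_cols defline header_char (find_cols defline header_char)

-- ===== LEMMAS AND PROOFS =====

-- first index j in [i, n) with P j, else none
def pvFirstIdx (P : Nat → Bool) (i n : Nat) : Option Nat :=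
  if _h : i < n then (if P i then some i else pvFirstIdx P (i+1) n) else none
termination_by n - i

theorem pvFirstIdx_of_ge (P : Nat → Bool) {i n : Nat} (h : n ≤ i) :
    pvFirstIdx P i n = none := by
  unfold pvFirstIdx; simp [Nat.not_lt.mpr h]

theorem pvFirstIdx_pos (P : Nat → Bool) {i n : Nat} (h : i < n) (hp : P i = true) :
    pvFirstIdx P i n = some i := by
  unfold pvFirstIdx; simp [h, hp]

theorem pvFirstIdx_step (P : Nat → Bool) {i n : Nat} (hp : P i = false) :
    pvFirstIdx P i n = pvFirstIdx P (i+1) n := by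
  by_cases h : i < n
  · conv_lhs => rw [pvFirstIdx]
    simp [h, hp]
  · rw [pvFirstIdx_of_ge P (Nat.not_lt.mp h), pvFirstIdx_of_ge P (by omega)]

theorem pvFirstIdx_some (P : Nat → Bool) {i n j : Nat}
    (h : pvFirstIdx P i n = some j) :
    i ≤ j ∧ j < n ∧ P j = true ∧ ∀ k, i ≤ k → k < j → P k = false := by
  rw [pvFirstIdx] at h
  by_cases hin : i < n
  · simp only [hin, dif_pos] at h
    by_cases hp : P i = true
    · simp only [hp, if_pos] at h
      obtain rfl := Option.some.inj h
      exact ⟨le_refl _, hin, hp, fun k hk1 hk2 => absurd hk1 (by omega)⟩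
    · simp only [hp, if_neg, Bool.false_eq_true, not_false_iff] at h
      have IH := pvFirstIdx_some P h
      refine ⟨by omega, IH.2.1, IH.2.2.1, fun k hk1 hk2 => ?_⟩
      rcases Nat.eq_or_lt_of_le hk1 with rfl | hlt
      · exact Bool.eq_false_iff.mpr hp
      · exact IH.2.2.2 k hlt hk2
  · simp [hin] at h
termination_by n - i
decreasing_by omega

theorem pvFirstIdx_none (P : Nat → Bool) {i n : Nat}
    (h : pvFirstIdx P i n = none) : ∀ j, i ≤ j → j < n → P j = false := by
  intro j hij hjn
  rw [pvFirstIdx] at h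
  have hin : i < n := by omega
  simp only [hin, dif_pos] at h
  by_cases hp : P i = true
  · simp [hp] at h
  · rcases Nat.eq_or_lt_of_le hij with rfl | hlt
    · exact Bool.eq_false_iff.mpr hp
    · simp only [hp, if_neg, Bool.false_eq_true, not_false_iff] at h
      exact pvFirstIdx_none P h j hlt hjn
termination_by n - i
decreasing_by omega

theorem pvFirstIdx_eq_some_of (P : Nat → Bool) {i n j : Nat}
    (hij : i ≤ j) (hjn : j < n) (hj : P j = true)
    (hmin : ∀ k, i ≤ k → k < j → P k = false) : pvFirstIdx P i n = some j := by
  rcases Nat.eq_or_lt_of_le hij with rfl | hlt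
  · exact pvFirstIdx_pos P hjn hj
  · rw [pvFirstIdx_step P (hmin i (le_refl _) hlt)]
    exact pvFirstIdx_eq_some_of P (by omega) hjn hj (fun k hk1 hk2 => hmin k (by omega) hk2)
termination_by j - i
decreasing_by omega

theorem pvFirstIdx_getD_ge (P : Nat → Bool) {s n : Nat} (h : s ≤ n) :
    s ≤ (pvFirstIdx P s n).getD n := by
  cases hv : pvFirstIdx P s n with
  | none => simpa using h
  | some j => have := pvFirstIdx_some P hv; simpa using this.1

-- "header_char matches at position j"
def pvMatchP (d h : List Char) (j : Nat) : Bool := decide (h <+: d.drop j)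

-- the (start, end) pairs produced from position i onwards
def pvCols (d h : List Char) (i : Nat) : List (Int × Int) :=
  match hm : pvFirstIdx (pvMatchP d h) i d.length with
  | none => []
  | some s =>
    let e := (pvFirstIdx (pvMatchP d [' ']) s d.length).getD d.length
    ((s : Int), (e : Int)) :: pvCols d h (e + 1)
termination_by d.length + 1 - i
decreasing_by
  have h1 := pvFirstIdx_some _ hm
  have h2 := pvFirstIdx_getD_ge (pvMatchP d [' ']) (n := d.length) (s := s) (by omega)
  omega

theorem pvCols_none (d h : List Char) {i : Nat}
    (hm : pvFirstIdx (pvMatchP d h) i d.length = none) : pvCols d h i = [] := by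
  rw [pvCols]
  split
  · rfl
  · next s heq => rw [hm] at heq; exact absurd heq (by simp)

theorem pvCols_some (d h : List Char) {i s : Nat}
    (hm : pvFirstIdx (pvMatchP d h) i d.length = some s) :
    pvCols d h i =
      ((s : Int), (((pvFirstIdx (pvMatchP d [' ']) s d.length).getD d.length : Nat) : Int)) ::
        pvCols d h ((pvFirstIdx (pvMatchP d [' ']) s d.length).getD d.length + 1) := by
  rw [pvCols]
  split
  · next heq => rw [hm] at heq; exact absurd heq (by simp)
  · next s' heq =>
      rw [hm] at heq
      obtain rfl := (Option.some.inj heq).symm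
      rfl

-- space predicate vs indexing
theorem pvSpace_iff (d : List Char) (j : Nat) :
    pvMatchP d [' '] j = true ↔ PySem.List.pyGet? d (j : Int) = some ' ' := by
  rw [PySem.List.pyGet?_natCast]
  unfold pvMatchP
  rw [decide_eq_true_iff, ← List.head?_drop]
  cases d.drop j with
  | nil => simp
  | cons c t => simp [List.cons_prefix_cons, eq_comm]

-- a match position is not a space position (header_char nonempty, not starting with a space)
theorem pvMatch_not_space (d h : List Char) (hh : h ≠ []) (hhead : h.head? ≠ some ' ') {j : Nat}
    (hm : pvMatchP d h j = true) : pvMatchP d [' '] j = false := by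
  unfold pvMatchP at hm ⊢
  rw [decide_eq_true_iff] at hm
  rw [decide_eq_false_iff_not]
  intro hsp'
  cases h with
  | nil => exact hh rfl
  | cons c t =>
      have h1 : (d.drop j).head? = some c := by
        cases hd : d.drop j with
        | nil => rw [hd] at hm; exact absurd hm (by simp)
        | cons b u =>
            obtain ⟨hcb, -⟩ := List.cons_prefix_cons.mp (hd ▸ hm)
            rw [hcb]; rfl
      have h2 : (d.drop j).head? = some ' ' := by
        cases hd : d.drop j with
        | nil => rw [hd] at hsp'; exact absurd hsp' (by simp)
        | cons b u =>
            obtain ⟨hsb, -⟩ := List.cons_prefix_cons.mp (hd ▸ hsp')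
            rw [← hsb]; rfl
      rw [h1] at h2
      obtain rfl := Option.some.inj h2
      exact hhead rfl

-- skipping a non-match position
theorem pvCols_step (d h : List Char) {j : Nat} (hm : pvMatchP d h j = false) :
    pvCols d h j = pvCols d h (j+1) := by
  have hstep := pvFirstIdx_step (pvMatchP d h) (n := d.length) hm
  cases hv : pvFirstIdx (pvMatchP d h) (j+1) d.length with
  | none => rw [pvCols_none d h (hstep.trans hv), pvCols_none d h hv]
  | some s => rw [pvCols_some d h (hstep.trans hv), pvCols_some d h hv]

-- findFrom computes pvFirstIdx of the prefix predicate (sub nonempty)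
theorem pvFindFrom_eq (d sub : List Char) (hsub : sub ≠ []) {k : Nat} (hk : k ≤ d.length) :
    PySem.Chars.findFrom d sub (k : Int) =
      (pvFirstIdx (pvMatchP d sub) k d.length).elim (-1 : Int) (fun j => (j : Int)) := by
  have hex : ∀ j : Nat, pvMatchP d sub j = true ↔ sub <+: d.drop j := by
    intro j; unfold pvMatchP; exact decide_eq_true_iff
  cases hv : pvFirstIdx (pvMatchP d sub) k d.length with
  | none =>
      simp only [Option.elim]
      rw [(PySem.Chars.findFrom_natCast_eq_neg_one_iff d sub k hk)]
      intro hinf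
      obtain ⟨m, hpre⟩ := (PySem.Chars.exists_prefix_drop_iff_isIn sub (d.drop k)).mpr
        ((PySem.Chars.isIn_iff_infix sub (d.drop k)).mpr hinf)
      rw [List.drop_drop] at hpre
      by_cases hjn : k + m < d.length
      · have := pvFirstIdx_none _ hv (k + m) (by omega) hjn
        rw [← Bool.not_eq_true, hex] at this
        exact this hpre
      · rw [List.drop_eq_nil_of_le (by omega)] at hpre
        exact hsub (List.prefix_nil.mp hpre)
  | some j =>
      simp only [Option.elim]
      obtain ⟨hkj, hjn, hPj, hmin⟩ := pvFirstIdx_some _ hv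
      have hinf2 : sub <:+: d.drop k := by
        apply (PySem.Chars.isIn_iff_infix sub (d.drop k)).mp
        apply (PySem.Chars.exists_prefix_drop_iff_isIn sub (d.drop k)).mp
        exact ⟨j - k, by rw [List.drop_drop]; have hjk : k + (j - k) = j := by omega
                         rw [hjk]; exact (hex j).mp hPj⟩
      have hne : PySem.Chars.findFrom d sub (k : Int) ≠ -1 := fun h0 =>
        (PySem.Chars.findFrom_natCast_eq_neg_one_iff d sub k hk).mp h0 hinf2
      obtain ⟨h1, h2, h3⟩ := PySem.Chars.findFrom_natCast_spec d sub k hk hne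
      set r := PySem.Chars.findFrom d sub (k : Int) with hr
      have hr0 : 0 ≤ r := le_trans (by exact_mod_cast Int.natCast_nonneg k) h1
      have hkr : k ≤ r.toNat := by omega
      have hrj : r.toNat = j := by
        rcases Nat.lt_trichotomy r.toNat j with hlt | heq | hgt
        · have := hmin r.toNat hkr hlt
          rw [← Bool.not_eq_true, hex] at this
          exact absurd h2 this
        · exact heq
        · exact absurd ((hex j).mp hPj) (h3 j hkj hgt)
      have : r = (j : Int) := by omega
      rw [this]

-- A's loop, from a balanced state, appends exactly pvCols
theorem AloopInv (defline header_char : String)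
    (hh : header_char.toList ≠ []) (hhead : header_char.toList.head? ≠ some ' ') :
    ∀ (fuel : Nat) (i : Nat) (starts ends : List Int),
      i ≤ defline.toList.length → starts.length = ends.length →
      2 * (defline.toList.length + 1 - i) ≤ fuel →
      findColsLoopA defline header_char fuel (i : Int) starts ends =
        (starts ++ (pvCols defline.toList header_char.toList i).map Prod.fst,
         ends ++ (pvCols defline.toList header_char.toList i).map Prod.snd) := by
  intro fuel
  induction fuel using Nat.strong_induction_on with
  | _ fuel IH =>
  intro i starts ends hi hlen hfuel
  obtain ⟨f, rfl⟩ : ∃ f, fuel = f + 2 := ⟨fuel - 2, by omega⟩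
  by_cases hin : i < defline.toList.length
  · have hcond : ((i : Nat) : Int) < PySem.Str.len defline := by
      rw [PySem.Str.len_eq]; exact_mod_cast hin
    rw [findColsLoopA, if_pos hcond, if_pos (le_of_eq hlen)]
    simp only [PySem.Str.findFrom_eq,
      pvFindFrom_eq defline.toList header_char.toList hh (le_of_lt hin)]
    cases hv : pvFirstIdx (pvMatchP defline.toList header_char.toList) i defline.toList.length with
    | none =>
        simp only [Option.elim]
        norm_num
        exact pvCols_none _ _ hv
    | some s =>
        simp only [Option.elim]
        obtain ⟨his, hsn, hPs, _hminS⟩ := pvFirstIdx_some _ hv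
        rw [if_pos (by positivity)]
        rw [findColsLoopA, if_pos (by rw [PySem.Str.len_eq]; exact_mod_cast hsn),
          if_neg (by simp [hlen])]
        simp only [PySem.Str.findFrom_eq, show (" " : String).toList = [' '] from rfl,
          pvFindFrom_eq defline.toList [' '] (by simp) (le_of_lt hsn)]
        cases hw : pvFirstIdx (pvMatchP defline.toList [' ']) s defline.toList.length with
        | none =>
            simp only [Option.elim]
            norm_num
            rw [pvCols_some _ _ hv, hw]
            rw [pvCols_none _ _ (pvFirstIdx_of_ge _ (by simp))]
            simp
        | some e =>
            simp only [Option.elim]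
            obtain ⟨hse, hen, hSe, _hminE⟩ := pvFirstIdx_some _ hw
            have hnse : pvMatchP defline.toList [' '] s = false :=
              pvMatch_not_space _ _ hh hhead hPs
            have hes : e ≠ s := fun hq => by rw [hq, hnse] at hSe; exact absurd hSe (by simp)
            have hme : pvMatchP defline.toList header_char.toList e = false := by
              cases hq : pvMatchP defline.toList header_char.toList e with
              | false => rfl
              | true =>
                  have := pvMatch_not_space _ _ hh hhead hq
                  rw [this] at hSe; exact absurd hSe (by simp)
            rw [if_pos (by positivity)]
            rw [IH f (by omega) e (starts ++ [(s : Int)]) (ends ++ [(e : Int)])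
              (by omega) (by simp [hlen]) (by omega)]
            rw [pvCols_step _ _ hme, pvCols_some _ _ hv, hw]
            simp
  · rw [findColsLoopA, if_neg (by rw [PySem.Str.len_eq]; exact_mod_cast hin)]
    rw [pvCols_none _ _ (pvFirstIdx_of_ge _ (by omega))]
    simp

theorem pvStartswith_eq (d h : List Char) (j : Nat) :
    PySem.Chars.startswith (d.drop j) h = pvMatchP d h j := by
  by_cases hp : h <+: d.drop j
  · rw [(PySem.Chars.startswith_iff _ _).mpr hp]
    unfold pvMatchP; simp [hp]
  · have h1 : PySem.Chars.startswith (d.drop j) h = false := by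
      rw [← Bool.not_eq_true, PySem.Chars.startswith_iff]; exact hp
    rw [h1]; unfold pvMatchP; simp [hp]

-- B's loop computes cols ++ (pending column, if any) ++ pvCols
theorem BloopInv (d h : List Char) (hh : h ≠ []) (hhead : h.head? ≠ some ' ') :
    ∀ (m j : Nat), j ≤ d.length → d.length - j ≤ m →
      ∀ (start? : Option Nat) (cols : List (Int × Int)),
      scanColsB d h d.length j start? cols =
        cols ++ (match start? with
          | none => pvCols d h j
          | some s =>
            ((s : Int), (((pvFirstIdx (pvMatchP d [' ']) j d.length).getD d.length : Nat) : Int)) ::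
              pvCols d h ((pvFirstIdx (pvMatchP d [' ']) j d.length).getD d.length + 1)) := by
  intro m
  induction m with
  | zero =>
      intro j hj hmj start? cols
      have hjn : j = d.length := by omega
      subst hjn
      rw [scanColsB.eq_def, dif_neg (by omega)]
      cases start? with
      | none => rw [pvCols_none _ _ (pvFirstIdx_of_ge _ (by omega))]; simp
      | some s =>
          rw [pvFirstIdx_of_ge (pvMatchP d [' ']) (le_refl _),
            pvCols_none _ _ (pvFirstIdx_of_ge (pvMatchP d h) (by omega))]
          simp [pvCols_none d h (pvFirstIdx_of_ge (pvMatchP d h)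
            (show d.length ≤ d.length + 1 by omega))]
  | succ m IH =>
      intro j hj hmj start? cols
      by_cases hjn : j < d.length
      · rw [scanColsB.eq_def, dif_pos hjn]
        cases start? with
        | none =>
            cases hmjv : pvMatchP d h j with
            | false =>
                simp only [pvStartswith_eq, hmjv, Bool.false_eq_true, and_false, if_false]
                rw [IH (j+1) (by omega) (by omega) none cols, pvCols_step _ _ hmjv]
            | true =>
                have hspf : pvMatchP d [' '] j = false := pvMatch_not_space d h hh hhead hmjv
                have hnc : ¬ (PySem.List.pyGet? d (j : Int) = some ' ') := fun hc => by
                  rw [(pvSpace_iff d j).mpr hc] at hspf; exact absurd hspf (by simp)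
                simp only [pvStartswith_eq, hmjv, and_true, if_pos, if_neg hnc]
                rw [IH (j+1) (by omega) (by omega) (some j) cols]
                rw [pvCols_some _ _ (pvFirstIdx_pos _ hjn hmjv), pvFirstIdx_step _ hspf]
        | some s =>
            have hs1 : ¬ ((some s : Option Nat) = none ∧
                PySem.Chars.startswith (d.drop j) h = true) := by simp
            cases hspv : pvMatchP d [' '] j with
            | true =>
                have hcond : PySem.List.pyGet? d (j : Int) = some ' ' :=
                  (pvSpace_iff d j).mp hspv
                simp only [if_neg hs1, if_pos hcond]
                rw [IH (j+1) (by omega) (by omega) none (cols ++ [((s : Int), (j : Int))])]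
                rw [pvFirstIdx_pos _ hjn hspv]
                simp
            | false =>
                have hnc : ¬ (PySem.List.pyGet? d (j : Int) = some ' ') := fun hc => by
                  rw [(pvSpace_iff d j).mpr hc] at hspv; exact absurd hspv (by simp)
                simp only [if_neg hs1, if_neg hnc]
                rw [IH (j+1) (by omega) (by omega) (some s) cols]
                rw [pvFirstIdx_step _ hspv]
      · have hjeq : j = d.length := by omega
        subst hjeq
        rw [scanColsB.eq_def, dif_neg (by omega)]
        cases start? with
        | none => rw [pvCols_none _ _ (pvFirstIdx_of_ge _ (by omega))]; simp
        | some s =>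
            rw [pvFirstIdx_of_ge (pvMatchP d [' ']) (le_refl _),
              pvCols_none _ _ (pvFirstIdx_of_ge (pvMatchP d h) (by omega))]
            simp [pvCols_none d h (pvFirstIdx_of_ge (pvMatchP d h)
              (show d.length ≤ d.length + 1 by omega))]


-- no occurrence of h anywhere in d means no prefix at any drop position
theorem pvNotPrefixAll (d h : List Char) (hnm : ¬ h <:+: d) : ∀ j, ¬ h <+: d.drop j :=
  fun j hp => hnm ((PySem.Chars.isIn_iff_infix h d).mp
    ((PySem.Chars.exists_prefix_drop_iff_isIn h d).mp ⟨j, hp⟩))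

-- a space prefix at some drop position means the line contains a space
theorem pvSpaceMem (d : List Char) {j : Nat} (hp : [' '] <+: d.drop j) : ' ' ∈ d := by
  cases hd : d.drop j with
  | nil => rw [hd] at hp; exact absurd hp (by simp)
  | cons b u =>
      obtain ⟨hsb, -⟩ := List.cons_prefix_cons.mp (hd ▸ hp)
      rw [hsb]
      exact List.mem_of_mem_drop (hd ▸ List.mem_cons_self)

theorem pvNoSpace_findFrom (d : List Char) (hnos : ' ' ∉ d) {k : Nat} (hk : k ≤ d.length) :
    PySem.Chars.findFrom d [' '] (k : Int) = -1 := by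
  rw [PySem.Chars.findFrom_natCast_eq_neg_one_iff d [' '] k hk]
  intro hinf
  obtain ⟨m, hpre⟩ := (PySem.Chars.exists_prefix_drop_iff_isIn [' '] (d.drop k)).mpr
    ((PySem.Chars.isIn_iff_infix [' '] (d.drop k)).mpr hinf)
  rw [List.drop_drop] at hpre
  exact hnos (pvSpaceMem d hpre)

theorem pvFindFrom_nil_zero (d : List Char) : PySem.Chars.findFrom d [] ((0 : Nat) : Int) = 0 := by
  have hne : PySem.Chars.findFrom d [] ((0 : Nat) : Int) ≠ -1 := fun h0 =>
    (PySem.Chars.findFrom_natCast_eq_neg_one_iff d [] 0 (Nat.zero_le _)).mp h0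
      List.nil_infix
  obtain ⟨h1, _h2, h3⟩ := PySem.Chars.findFrom_natCast_spec d [] 0 (Nat.zero_le _) hne
  by_contra hne0
  have hpos : 0 < (PySem.Chars.findFrom d [] ((0 : Nat) : Int)).toNat := by
    simp only [Nat.cast_zero] at h1 hne0 ⊢
    omega
  exact h3 0 (Nat.zero_le _) hpos (List.nil_prefix)

-- B's scan never opens a column when h occurs nowhere
theorem pvBscanNoMatch (d h : List Char) (hall : ∀ j, ¬ h <+: d.drop j) :
    ∀ (j : Nat) (cols : List (Int × Int)), scanColsB d h d.length j none cols = cols := by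
  intro j cols
  rw [scanColsB.eq_def]
  by_cases hjn : j < d.length
  · have hsw : PySem.Chars.startswith (d.drop j) h = false := by
      rw [← Bool.not_eq_true, PySem.Chars.startswith_iff]; exact hall j
    simp only [dif_pos hjn, hsw, Bool.false_eq_true, and_false, if_false]
    exact pvBscanNoMatch d h hall (j+1) cols
  · simp [dif_neg hjn]
termination_by j => d.length - j
decreasing_by omega

-- B's scan never closes a column when d contains no space
theorem pvBscanNoSpace (d h : List Char) (hnos : ' ' ∉ d) :
    ∀ (j s : Nat) (cols : List (Int × Int)),
      scanColsB d h d.length j (some s) cols = cols ++ [((s : Int), (d.length : Int))] := by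
  intro j s cols
  rw [scanColsB.eq_def]
  by_cases hjn : j < d.length
  · have hs1 : ¬ ((some s : Option Nat) = none ∧
        PySem.Chars.startswith (d.drop j) h = true) := by simp
    have hnc : ¬ (PySem.List.pyGet? d (j : Int) = some ' ') := fun hc => by
      rw [PySem.List.pyGet?_natCast] at hc
      exact hnos (List.mem_of_getElem? hc)
    simp only [dif_pos hjn, if_neg hs1, if_neg hnc]
    exact pvBscanNoSpace d h hnos (j+1) s cols
  · simp [dif_neg hjn]
termination_by j _ => d.length - j
decreasing_by omega

-- A = B when header_char occurs nowhere in defline (covers a leading-space header_char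
-- admitted by Pre_): both return []
theorem pvNoMatchCase (defline header_char : String)
    (hnm : ¬ header_char.toList <:+: defline.toList) :
    find_cols defline header_char = find_cols_alt defline header_char := by
  unfold find_cols find_cols_alt
  have hB := pvBscanNoMatch defline.toList header_char.toList
    (pvNotPrefixAll _ _ hnm) 0 []
  rw [hB]
  have hfind : PySem.Str.findFrom defline header_char ((0 : Nat) : Int) = -1 := by
    rw [PySem.Str.findFrom_eq,
      PySem.Chars.findFrom_natCast_eq_neg_one_iff defline.toList header_char.toList 0
        (Nat.zero_le _)]
    simpa using hnm
  rw [findColsLoopA]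
  by_cases h0 : ((0 : Int) < PySem.Str.len defline)
  · rw [if_pos h0, if_pos (le_refl _)]
    simp only [Nat.cast_zero] at hfind
    rw [hfind]
    norm_num
  · rw [if_neg h0]
    simp

-- A = B for the empty header_char when defline has no space (the only way A returns there)
theorem pvEmptyCase (defline header_char : String) (hh : header_char.toList = [])
    (hnos : ' ' ∉ defline.toList) :
    find_cols defline header_char = find_cols_alt defline header_char := by
  by_cases hn : defline.toList.length = 0
  · unfold find_cols find_cols_alt
    rw [scanColsB.eq_def, dif_neg (by omega)]
    rw [findColsLoopA, if_neg (by rw [PySem.Str.len_eq]; exact_mod_cast (by omega))]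
    simp
  · have hfind0 : PySem.Str.findFrom defline header_char ((0 : Nat) : Int) = 0 := by
      rw [PySem.Str.findFrom_eq, hh]; exact pvFindFrom_nil_zero defline.toList
    have hfindsp : PySem.Str.findFrom defline " " ((0 : Nat) : Int) = -1 := by
      rw [PySem.Str.findFrom_eq, show (" " : String).toList = [' '] from rfl]
      exact pvNoSpace_findFrom defline.toList hnos (Nat.zero_le _)
    simp only [Nat.cast_zero] at hfind0 hfindsp
    have hBval : find_cols_alt defline header_char
        = [((0 : Int), (defline.toList.length : Int))] := by
      unfold find_cols_alt
      rw [scanColsB.eq_def, dif_pos (by omega : (0 : Nat) < defline.toList.length)]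
      have hsw : PySem.Chars.startswith (defline.toList.drop 0) header_char.toList = true := by
        rw [PySem.Chars.startswith_iff, hh]; exact List.nil_prefix
      have hnc : ¬ (PySem.List.pyGet? defline.toList ((0 : Nat) : Int) = some ' ') := fun hc => by
        rw [PySem.List.pyGet?_natCast] at hc
        exact hnos (List.mem_of_getElem? hc)
      simp only [hsw, and_true, if_true, if_neg hnc]
      have hres := pvBscanNoSpace defline.toList header_char.toList hnos 1 0 []
      norm_num at hres ⊢
      exact hres
    have hAval : find_cols defline header_char
        = [((0 : Int), (defline.toList.length : Int))] := by
      unfold find_cols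
      rw [findColsLoopA,
        if_pos (by rw [PySem.Str.len_eq]; exact_mod_cast Nat.pos_of_ne_zero hn),
        if_pos (le_refl _)]
      simp only [hfind0]
      norm_num
      rw [findColsLoopA,
        if_pos (by rw [PySem.Str.len_eq]; exact_mod_cast Nat.pos_of_ne_zero hn),
        if_neg (by simp)]
      simp only [hfindsp]
      norm_num [PySem.Str.len_eq]
    rw [hAval, hBval]

-- ===== VERDICT (by name: the statement is the Claim_ definition above) =====
theorem find_cols_spec : Claim_equal_find_cols := by
  intro defline header_char _hdom hpre
  unfold Spec_find_cols
  unfold Pre_find_cols at hpre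
  obtain ⟨h1, h2⟩ := not_or.mp hpre
  by_cases hh : header_char.toList = []
  · exact pvEmptyCase defline header_char hh (fun hspc => h1 ⟨hh, hspc⟩)
  · by_cases hhead : header_char.toList.head? = some ' '
    · exact pvNoMatchCase defline header_char (fun hocc => h2 ⟨hhead, hocc⟩)
    · have hA := AloopInv defline header_char hh hhead (2 * defline.toList.length + 2) 0 [] []
        (by omega) rfl (by omega)
      have hB := BloopInv defline.toList header_char.toList hh hhead
        defline.toList.length 0 (by omega) (by omega) none []
      simp only [Nat.cast_zero] at hA
      unfold find_cols find_cols_alt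
      simp only [hA, hB]
      simp [← List.unzip_fst, ← List.unzip_snd, List.zip_unzip]
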